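-- pv_equiv track=rewrite | github.com/lung-andreea-selena/University | Semester 1/Fundamentals of Programming/A5/program.py | from_big_list_to_list_of_lists
-- ===== SOURCE A (Python) =====
-- def from_big_list_to_list_of_lists(listt):
--     complex_nr_list = []
--     for i in range(0, len(listt) - 1, 2):
--         r = listt[i]
--         img = listt[i + 1]
--         z = create_complex_number(r, img)
--         complex_nr_list.append(z)
--     return complex_nr_list
--
-- def create_complex_number(real, imaginary):
--     z = [real, imaginary]
--     return z
-- ===== SOURCE B (Python) =====
-- def from_big_list_to_list_of_lists(listt):
--     it = iter(listt)
--     return [[a, b] for a, b in zip(it, it)]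
-- ===== Notes on version B (the rewrite author's own statement) =====
-- stated objective: idiomatic
-- what changed: B pairs consecutive elements by zipping one shared iterator with itself (structural two-at-a-time consumption), instead of A's index arithmetic over range(0, len-1, 2) with element lookups.
import Mathlib
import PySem

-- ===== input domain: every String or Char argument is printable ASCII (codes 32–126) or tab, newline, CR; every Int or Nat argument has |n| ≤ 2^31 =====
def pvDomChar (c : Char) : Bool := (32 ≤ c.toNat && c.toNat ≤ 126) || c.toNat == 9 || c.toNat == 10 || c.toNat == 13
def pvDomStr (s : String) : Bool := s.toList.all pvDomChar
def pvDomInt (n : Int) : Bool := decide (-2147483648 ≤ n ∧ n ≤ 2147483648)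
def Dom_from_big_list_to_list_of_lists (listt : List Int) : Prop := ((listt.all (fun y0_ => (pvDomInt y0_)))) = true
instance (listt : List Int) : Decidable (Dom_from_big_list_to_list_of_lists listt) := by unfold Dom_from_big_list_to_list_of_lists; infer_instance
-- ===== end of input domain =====

-- B pairs consecutive elements by consuming the list two at a time (Python: zip of one
-- shared iterator with itself), instead of A's index loop over range(0, len-1, 2).

-- ===== PORT A =====
-- helper: create_complex_number(real, imaginary) = [real, imaginary]
def create_complex_number (real imaginary : Int) : List Int := [real, imaginary]

-- for i in range(0, len(listt)-1, 2): append [listt[i], listt[i+1]]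
-- (indices i, i+1 are always in range here, so pyGetD's default 0 is never used)
def from_big_list_to_list_of_lists (listt : List Int) : List (List Int) :=
  (PySem.List.pyRange 0 (PySem.List.len listt - 1) 2).foldl
    (fun acc i =>
      let r := PySem.List.pyGetD listt i 0
      let img := PySem.List.pyGetD listt (i + 1) 0
      let z := create_complex_number r img
      acc ++ [z]) []

-- ===== PORT B =====
-- zip(it, it) on one iterator = consume the list two elements at a time
def from_big_list_to_list_of_lists_alt : List Int → List (List Int)
  | a :: b :: rest => [a, b] :: from_big_list_to_list_of_lists_alt rest
  | _ => []

-- ===== PRECONDITION & SPEC =====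
def Spec_from_big_list_to_list_of_lists (listt : List Int) (out : List (List Int)) : Prop := out = from_big_list_to_list_of_lists_alt listt
instance (listt : List Int) (out : List (List Int)) : Decidable (Spec_from_big_list_to_list_of_lists listt out) := by unfold Spec_from_big_list_to_list_of_lists; infer_instance

-- ===== CLAIM (what is proved, stated in full; the proofs are below) =====
def Claim_equal_from_big_list_to_list_of_lists : Prop := ∀ (listt : List Int), Dom_from_big_list_to_list_of_lists listt → Spec_from_big_list_to_list_of_lists listt (from_big_list_to_list_of_lists listt)

-- ===== LEMMAS AND PROOFS =====

theorem pv_flatMap_single {α β : Type} (f : α → β) (l : List α) :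
    l.flatMap (fun x => [f x]) = l.map f := by
  induction l with
  | nil => simp
  | cons x xs ih => simp [ih]

-- B's port, characterised as a map over pair indices
theorem alt_eq_map : ∀ (l : List Int),
    from_big_list_to_list_of_lists_alt l =
      (List.range (l.length / 2)).map (fun k => [l.getD (2 * k) 0, l.getD (2 * k + 1) 0])
  | [] => by simp [from_big_list_to_list_of_lists_alt]
  | [a] => by simp [from_big_list_to_list_of_lists_alt]
  | a :: b :: rest => by
    have ih := alt_eq_map rest
    have hlen : (a :: b :: rest).length / 2 = rest.length / 2 + 1 := by
      simp [List.length]; omega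
    rw [from_big_list_to_list_of_lists_alt, ih, hlen, List.range_succ_eq_map]
    simp only [List.map_cons, List.map_map]
    congr 1

theorem from_big_list_to_list_of_lists_spec' (l : List Int) :
    from_big_list_to_list_of_lists l = from_big_list_to_list_of_lists_alt l := by
  rw [from_big_list_to_list_of_lists, alt_eq_map,
      PySem.List.pyRange_of_pos 0 ((PySem.List.len l) - 1) (by norm_num),
      List.foldl_map, PySem.List.foldl_append_eq_flatMap]
  simp only [List.nil_append, create_complex_number]
  rw [pv_flatMap_single]
  have hn : (if (0:Int) < PySem.List.len l - 1 then (((PySem.List.len l) - 1 - 0 + 2 - 1) / 2).toNat else 0)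
      = l.length / 2 := by
    simp only [PySem.List.len_eq]
    split <;> omega
  rw [hn]
  apply List.map_congr_left
  intro k _
  have e1 : (0 : Int) + 2 * (k : Int) = ((2 * k : Nat) : Int) := by push_cast; ring
  have e2 : ((2 * k : Nat) : Int) + 1 = ((2 * k + 1 : Nat) : Int) := by push_cast; ring
  rw [e1, e2, PySem.List.pyGetD_natCast, PySem.List.pyGetD_natCast]

-- ===== VERDICT (by name: the statement is the Claim_ definition above) =====
theorem from_big_list_to_list_of_lists_spec : Claim_equal_from_big_list_to_list_of_lists := by
  intro listt _
  exact from_big_list_to_list_of_lists_spec' listt
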